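-- pv_equiv track=rewrite | github.com/THU-KEG/OmniEvent | OmniEvent/input_engineering/token_classification_processor.py | insert_marker
-- ===== SOURCE A (Python) =====
-- from typing import List, Optional, Dict
--
-- def insert_marker(text: str,
--                   type: str,
--                   trigger_position: List[int],
--                   argument_position: List[int],
--                   markers: Dict[str, str],
--                   whitespace: Optional[bool] = True) -> str:
--     """Adds a marker at the start and end position of event triggers and argument mentions."""
--     marked_text = ""
--     for i, char in enumerate(text):
--         if i == trigger_position[0]:
--             marked_text += markers[type][0]
--             marked_text += " " if whitespace else ""
--         if i == argument_position[0]: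
--             marked_text += markers["argument"][0]
--             marked_text += " " if whitespace else ""
--         marked_text += char
--         if i == trigger_position[1] - 1:
--             marked_text += " " if whitespace else ""
--             marked_text += markers[type][1]
--         if i == argument_position[1] - 1:
--             marked_text += " " if whitespace else ""
--             marked_text += markers["argument"][1]
--     return marked_text
-- ===== SOURCE B (Python) =====
-- def insert_marker(text, type, trigger_position, argument_position, markers, whitespace=True):
--     """Collect the (at most four) marker insertion events, sort them by boundary
--     (stable sort keeps closings before openings and trigger before argument at a
--     shared boundary), then splice slices of the original text between boundaries."""
--     if not text:
--         return ""
--     n = len(text)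
--     ws = " " if whitespace else ""
--     tp0, tp1 = trigger_position[0], trigger_position[1]
--     ap0, ap1 = argument_position[0], argument_position[1]
--     events = []
--     if 1 <= tp1 <= n:
--         events.append((tp1, 0, ws + markers[type][1]))
--     if 1 <= ap1 <= n:
--         events.append((ap1, 1, ws + markers["argument"][1]))
--     if 0 <= tp0 < n:
--         events.append((tp0, 2, markers[type][0] + ws))
--     if 0 <= ap0 < n:
--         events.append((ap0, 3, markers["argument"][0] + ws))
--     events.sort(key=lambda e: e[0])  # stable: priority field documents the order kept
--     pieces = []
--     prev = 0
--     for pos, _, s in events: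
--         pieces.append(text[prev:pos])
--         pieces.append(s)
--         prev = pos
--     pieces.append(text[prev:])
--     return "".join(pieces)
-- ===== Notes on version B (the rewrite author's own statement) =====
-- stated objective: alternative
-- what changed: B replaces A's per-character accumulator loop with event collection: it gathers the at-most-four marker insertion events, stable-sorts them by boundary (priority order keeps closings before openings and trigger before argument), and splices slices of the original text between consecutive boundaries.
import Mathlib
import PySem

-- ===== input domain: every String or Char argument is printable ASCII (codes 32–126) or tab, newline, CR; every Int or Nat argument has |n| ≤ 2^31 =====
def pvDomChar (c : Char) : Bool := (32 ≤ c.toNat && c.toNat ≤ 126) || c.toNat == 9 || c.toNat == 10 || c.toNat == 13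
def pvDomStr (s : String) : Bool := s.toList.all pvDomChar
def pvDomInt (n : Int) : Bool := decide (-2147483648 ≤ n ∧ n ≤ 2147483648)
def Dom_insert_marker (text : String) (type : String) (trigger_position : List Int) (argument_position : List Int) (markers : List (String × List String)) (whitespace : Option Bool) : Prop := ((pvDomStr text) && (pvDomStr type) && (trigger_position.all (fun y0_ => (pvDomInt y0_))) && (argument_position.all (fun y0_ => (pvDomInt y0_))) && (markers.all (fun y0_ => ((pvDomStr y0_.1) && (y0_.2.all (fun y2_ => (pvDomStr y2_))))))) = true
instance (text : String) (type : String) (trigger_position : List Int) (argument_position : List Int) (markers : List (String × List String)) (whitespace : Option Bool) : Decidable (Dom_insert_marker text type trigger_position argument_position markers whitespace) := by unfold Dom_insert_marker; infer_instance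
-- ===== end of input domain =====

-- B replaces A's per-character scan with event collection + stable sort by boundary +
-- splicing text slices between boundaries; objective: alternative algorithm, same cost.
-- Equality of the RETURN value is what is proved.

-- ===== PORT A =====
-- markers[k][j]: first-match association lookup, then Python indexing; the "" default
-- is unreachable on inputs satisfying Pre_ (Python raises KeyError/IndexError there).
def pvMarkerA (markers : List (String × List String)) (k : String) (j : Int) : List Char :=
  (((markers.find? (fun kv => kv.1 == k)).bind (fun kv => PySem.List.pyGet? kv.2 j)).getD "").toList

def insert_marker (text : String) (type : String) (trigger_position : List Int) (argument_position : List Int) (markers : List (String × List String)) (whitespace : Option Bool) : String :=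
  -- '" " if whitespace else ""': some false and none (Python None) are both falsy
  let ws : List Char := if whitespace = some true then [' '] else []
  -- trigger_position[0] etc. are read inside A's loop but are loop-invariant; the
  -- .getD 0 default is only reached when text = "" (the loop body never runs) or
  -- outside Pre_ (Python raises IndexError there)
  let tp0 : Int := (PySem.List.pyGet? trigger_position 0).getD 0
  let tp1 : Int := (PySem.List.pyGet? trigger_position 1).getD 0
  let ap0 : Int := (PySem.List.pyGet? argument_position 0).getD 0
  let ap1 : Int := (PySem.List.pyGet? argument_position 1).getD 0
  let step : List Char → Int × Char → List Char := fun acc ic =>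
    let acc := if ic.1 = tp0 then acc ++ pvMarkerA markers type 0 ++ ws else acc
    let acc := if ic.1 = ap0 then acc ++ pvMarkerA markers "argument" 0 ++ ws else acc
    let acc := acc ++ [ic.2]
    let acc := if ic.1 = tp1 - 1 then acc ++ ws ++ pvMarkerA markers type 1 else acc
    if ic.1 = ap1 - 1 then acc ++ ws ++ pvMarkerA markers "argument" 1 else acc
  String.mk ((PySem.List.enumerate text.toList).foldl step [])

-- ===== PORT B =====
-- markers[k][j], as read in Source B (same lookup, B's own copy)
def pvMarkerB (markers : List (String × List String)) (k : String) (j : Int) : List Char :=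
  (((markers.find? (fun kv => kv.1 == k)).bind (fun kv => PySem.List.pyGet? kv.2 j)).getD "").toList

def insert_marker_alt (text : String) (type : String) (trigger_position : List Int) (argument_position : List Int) (markers : List (String × List String)) (whitespace : Option Bool) : String :=
  if text = "" then "" else
  let n : Int := text.toList.length
  let ws : List Char := if whitespace = some true then [' '] else []  -- same truthiness rule as A
  let tp0 : Int := (PySem.List.pyGet? trigger_position 0).getD 0
  let tp1 : Int := (PySem.List.pyGet? trigger_position 1).getD 0
  let ap0 : Int := (PySem.List.pyGet? argument_position 0).getD 0
  let ap1 : Int := (PySem.List.pyGet? argument_position 1).getD 0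
  -- Source B's event list: (boundary, priority, marker string), built in priority order
  let events : List (Int × Int × List Char) :=
    (if 1 ≤ tp1 ∧ tp1 ≤ n then [(tp1, 0, ws ++ pvMarkerB markers type 1)] else []) ++
    (if 1 ≤ ap1 ∧ ap1 ≤ n then [(ap1, 1, ws ++ pvMarkerB markers "argument" 1)] else []) ++
    (if 0 ≤ tp0 ∧ tp0 < n then [(tp0, 2, pvMarkerB markers type 0 ++ ws)] else []) ++
    (if 0 ≤ ap0 ∧ ap0 < n then [(ap0, 3, pvMarkerB markers "argument" 0 ++ ws)] else [])
  -- 'events.sort(key=lambda e: e[0])' — stable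
  let sortedEvents := PySem.List.sorted events (fun e => e.1)
  -- the splice loop: pieces of text between consecutive boundaries, then the tail slice
  let r := sortedEvents.foldl
    (fun (a : List Char × Int) e =>
      (a.1 ++ PySem.List.slice text.toList (some a.2) (some e.1) ++ e.2.2, e.1))
    ([], 0)
  String.mk (r.1 ++ PySem.List.slice text.toList (some r.2) none)

-- ===== PRECONDITION & SPEC =====
-- Pre_ = exactly the inputs where Python A returns (no exception): with nonempty text
-- both position lists need two entries, and whenever a marker actually fires the
-- looked-up markers entry must exist and be long enough.
def Pre_insert_marker (text : String) (type : String) (trigger_position : List Int) (argument_position : List Int) (markers : List (String × List String)) (whitespace : Option Bool) : Prop :=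
  text = "" ∨
  (2 ≤ trigger_position.length ∧ 2 ≤ argument_position.length ∧
   (let n : Int := text.toList.length
    let tp0 := trigger_position.getD 0 0
    let tp1 := trigger_position.getD 1 0
    let ap0 := argument_position.getD 0 0
    let ap1 := argument_position.getD 1 0
    let mlen : String → Nat := fun k => ((markers.find? (fun kv => kv.1 == k)).map (fun kv => kv.2.length)).getD 0
    ((0 ≤ tp0 ∧ tp0 < n) → 1 ≤ mlen type) ∧
    ((1 ≤ tp1 ∧ tp1 ≤ n) → 2 ≤ mlen type) ∧
    ((0 ≤ ap0 ∧ ap0 < n) → 1 ≤ mlen "argument") ∧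
    ((1 ≤ ap1 ∧ ap1 ≤ n) → 2 ≤ mlen "argument")))
instance (text : String) (type : String) (trigger_position : List Int) (argument_position : List Int) (markers : List (String × List String)) (whitespace : Option Bool) : Decidable (Pre_insert_marker text type trigger_position argument_position markers whitespace) := by unfold Pre_insert_marker; infer_instance

def pvWitness_insert_marker : String × String × List Int × List Int × (List (String × List String)) × Option Bool :=
  ("ab", "trigger", [0, 1], [1, 2], [("trigger", ["<t>", "</t>"]), ("argument", ["<a>", "</a>"])], some true)

def Spec_insert_marker (text : String) (type : String) (trigger_position : List Int) (argument_position : List Int) (markers : List (String × List String)) (whitespace : Option Bool) (out : String) : Prop := out = insert_marker_alt text type trigger_position argument_position markers whitespace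
instance (text : String) (type : String) (trigger_position : List Int) (argument_position : List Int) (markers : List (String × List String)) (whitespace : Option Bool) (out : String) : Decidable (Spec_insert_marker text type trigger_position argument_position markers whitespace out) := by unfold Spec_insert_marker; infer_instance

-- ===== CLAIM (what is proved, stated in full; the proofs are below) =====
def Claim_equal_insert_marker : Prop := ∀ (text : String) (type : String) (trigger_position : List Int) (argument_position : List Int) (markers : List (String × List String)) (whitespace : Option Bool), Dom_insert_marker text type trigger_position argument_position markers whitespace → Pre_insert_marker text type trigger_position argument_position markers whitespace → Spec_insert_marker text type trigger_position argument_position markers whitespace (insert_marker text type trigger_position argument_position markers whitespace)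

-- ===== LEMMAS AND PROOFS =====

-- the marker text A appends around character ic (opens before it, closes after it)
def pvEmitA (ws mot moa mct mca : List Char) (tp0 tp1 ap0 ap1 : Int) (ic : Int × Char) : List Char :=
  (if ic.1 = tp0 then mot ++ ws else []) ++ (if ic.1 = ap0 then moa ++ ws else []) ++
  [ic.2] ++ (if ic.1 = tp1 - 1 then ws ++ mct else []) ++ (if ic.1 = ap1 - 1 then ws ++ mca else [])

-- the marker text belonging to the gap before position p (closings, then openings)
def pvAtBoundary (ws mot moa mct mca : List Char) (tp0 tp1 ap0 ap1 n p : Int) : List Char :=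
  (if p = tp1 ∧ 1 ≤ tp1 ∧ tp1 ≤ n then ws ++ mct else []) ++
  (if p = ap1 ∧ 1 ≤ ap1 ∧ ap1 ≤ n then ws ++ mca else []) ++
  (if p = tp0 ∧ 0 ≤ tp0 ∧ tp0 < n then mot ++ ws else []) ++
  (if p = ap0 ∧ 0 ≤ ap0 ∧ ap0 < n then moa ++ ws else [])

-- just the closing half of a boundary (what A's iteration i contributes at boundary i+1)
def pvCloseAt (ws mct mca : List Char) (tp1 ap1 n p : Int) : List Char :=
  (if p = tp1 ∧ 1 ≤ tp1 ∧ tp1 ≤ n then ws ++ mct else []) ++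
  (if p = ap1 ∧ 1 ≤ ap1 ∧ ap1 ≤ n then ws ++ mca else [])

-- the marker text of the event list l at boundary p (events keep their list order)
def pvPerB (l : List (Int × Int × List Char)) (p : Int) : List Char :=
  ((l.filter (fun e => e.1 == p)).map (fun e => e.2.2)).flatten

theorem pvAtBoundary_split (ws mot moa mct mca : List Char) (tp0 tp1 ap0 ap1 n p : Int) :
    pvAtBoundary ws mot moa mct mca tp0 tp1 ap0 ap1 n p =
      pvCloseAt ws mct mca tp1 ap1 n p ++
      ((if p = tp0 ∧ 0 ≤ tp0 ∧ tp0 < n then mot ++ ws else []) ++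
       (if p = ap0 ∧ 0 ≤ ap0 ∧ ap0 < n then moa ++ ws else [])) := by
  simp [pvAtBoundary, pvCloseAt]

-- key loop correspondence: A's per-character emissions, prefixed with the closings still
-- owed at the current boundary, equal the per-boundary emissions plus the final boundary
theorem pvKey (ws mot moa mct mca : List Char) (tp0 tp1 ap0 ap1 n : Int)
    (cs : List Char) :
    ∀ (k : Int), 0 ≤ k → k + cs.length = n →
      pvCloseAt ws mct mca tp1 ap1 n k ++
        (PySem.List.enumerate cs k).flatMap (pvEmitA ws mot moa mct mca tp0 tp1 ap0 ap1) =
      (PySem.List.enumerate cs k).flatMap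
          (fun ic => pvAtBoundary ws mot moa mct mca tp0 tp1 ap0 ap1 n ic.1 ++ [ic.2]) ++
        pvAtBoundary ws mot moa mct mca tp0 tp1 ap0 ap1 n n := by
  induction cs with
  | nil =>
      intro k hk hn
      have hn' : k = n := by simpa using hn
      subst hn'
      have h1 : ¬ (k = tp0 ∧ 0 ≤ tp0 ∧ tp0 < k) := by omega
      have h2 : ¬ (k = ap0 ∧ 0 ≤ ap0 ∧ ap0 < k) := by omega
      rw [pvAtBoundary_split]
      simp [PySem.List.enumerate, h1, h2]
  | cons c cs ih =>
      intro k hk hn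
      have hlen : k + (1 + (cs.length : Int)) = n := by
        simpa [add_comm, add_left_comm] using hn
      have hkn : k < n := by omega
      simp only [PySem.List.enumerate_cons, List.flatMap_cons]
      rw [pvAtBoundary_split]
      have hopen : (if k = tp0 then mot ++ ws else []) = (if k = tp0 ∧ 0 ≤ tp0 ∧ tp0 < n then mot ++ ws else []) := by
        have h : (k = tp0) ↔ (k = tp0 ∧ 0 ≤ tp0 ∧ tp0 < n) := by constructor <;> intro h' <;> [omega; exact h'.1]
        exact if_congr h rfl rfl
      have hopen' : (if k = ap0 then moa ++ ws else []) = (if k = ap0 ∧ 0 ≤ ap0 ∧ ap0 < n then moa ++ ws else []) := by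
        have h : (k = ap0) ↔ (k = ap0 ∧ 0 ≤ ap0 ∧ ap0 < n) := by constructor <;> intro h' <;> [omega; exact h'.1]
        exact if_congr h rfl rfl
      have hclose : (if k = tp1 - 1 then ws ++ mct else []) = (if k + 1 = tp1 ∧ 1 ≤ tp1 ∧ tp1 ≤ n then ws ++ mct else []) := by
        have h : (k = tp1 - 1) ↔ (k + 1 = tp1 ∧ 1 ≤ tp1 ∧ tp1 ≤ n) := by
          constructor <;> intro h' <;> omega
        simp only [h]
      have hclose' : (if k = ap1 - 1 then ws ++ mca else []) = (if k + 1 = ap1 ∧ 1 ≤ ap1 ∧ ap1 ≤ n then ws ++ mca else []) := by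
        have h : (k = ap1 - 1) ↔ (k + 1 = ap1 ∧ 1 ≤ ap1 ∧ ap1 ≤ n) := by
          constructor <;> intro h' <;> omega
        simp only [h]
      have ihk := ih (k + 1) (by omega) (by omega)
      calc pvCloseAt ws mct mca tp1 ap1 n k ++
            (pvEmitA ws mot moa mct mca tp0 tp1 ap0 ap1 (k, c) ++
              (PySem.List.enumerate cs (k + 1)).flatMap (pvEmitA ws mot moa mct mca tp0 tp1 ap0 ap1))
          = (pvCloseAt ws mct mca tp1 ap1 n k ++
              ((if k = tp0 ∧ 0 ≤ tp0 ∧ tp0 < n then mot ++ ws else []) ++ (if k = ap0 ∧ 0 ≤ ap0 ∧ ap0 < n then moa ++ ws else []) ++ [c])) ++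
            (pvCloseAt ws mct mca tp1 ap1 n (k + 1) ++
              (PySem.List.enumerate cs (k + 1)).flatMap (pvEmitA ws mot moa mct mca tp0 tp1 ap0 ap1)) := by
            simp only [pvEmitA, pvCloseAt, hopen, hopen', hclose, hclose']
            simp [List.append_assoc]
        _ = (pvCloseAt ws mct mca tp1 ap1 n k ++
              ((if k = tp0 ∧ 0 ≤ tp0 ∧ tp0 < n then mot ++ ws else []) ++ (if k = ap0 ∧ 0 ≤ ap0 ∧ ap0 < n then moa ++ ws else []) ++ [c])) ++
            ((PySem.List.enumerate cs (k + 1)).flatMap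
                (fun ic => pvAtBoundary ws mot moa mct mca tp0 tp1 ap0 ap1 n ic.1 ++ [ic.2]) ++
              pvAtBoundary ws mot moa mct mca tp0 tp1 ap0 ap1 n n) := by rw [ihk]
        _ = _ := by
            rw [pvAtBoundary_split]
            simp [List.append_assoc]

theorem pvCloseAt_zero (ws mct mca : List Char) (tp1 ap1 n : Int) :
    pvCloseAt ws mct mca tp1 ap1 n 0 = [] := by
  have h1 : ¬ ((0 : Int) = tp1 ∧ 1 ≤ tp1 ∧ tp1 ≤ n) := by omega
  have h2 : ¬ ((0 : Int) = ap1 ∧ 1 ≤ ap1 ∧ ap1 ≤ n) := by omega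
  simp [pvCloseAt, h1, h2]

-- A's loop body is 'append this iteration's emission'
theorem pvFoldA (ws mot moa mct mca : List Char) (tp0 tp1 ap0 ap1 : Int) (l : List (Int × Char)) (acc : List Char) :
    l.foldl (fun acc ic =>
        let acc := if ic.1 = tp0 then acc ++ mot ++ ws else acc
        let acc := if ic.1 = ap0 then acc ++ moa ++ ws else acc
        let acc := acc ++ [ic.2]
        let acc := if ic.1 = tp1 - 1 then acc ++ ws ++ mct else acc
        if ic.1 = ap1 - 1 then acc ++ ws ++ mca else acc) acc
      = acc ++ l.flatMap (pvEmitA ws mot moa mct mca tp0 tp1 ap0 ap1) := by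
  have h : (fun (acc : List Char) (ic : Int × Char) =>
        let acc := if ic.1 = tp0 then acc ++ mot ++ ws else acc
        let acc := if ic.1 = ap0 then acc ++ moa ++ ws else acc
        let acc := acc ++ [ic.2]
        let acc := if ic.1 = tp1 - 1 then acc ++ ws ++ mct else acc
        if ic.1 = ap1 - 1 then acc ++ ws ++ mca else acc)
      = fun acc ic => acc ++ pvEmitA ws mot moa mct mca tp0 tp1 ap0 ap1 ic := by
    funext acc ic
    simp only [pvEmitA]
    split_ifs <;> simp
  rw [h, PySem.List.foldl_append_eq_flatMap]

-- ---- pvPerB basics ----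

theorem pvPerB_nil (p : Int) : pvPerB [] p = [] := rfl

theorem pvPerB_cons (e : Int × Int × List Char) (t : List (Int × Int × List Char)) (p : Int) :
    pvPerB (e :: t) p = (if e.1 = p then e.2.2 else []) ++ pvPerB t p := by
  by_cases h : e.1 = p <;> simp [pvPerB, h]

theorem pvPerB_append (l₁ l₂ : List (Int × Int × List Char)) (p : Int) :
    pvPerB (l₁ ++ l₂) p = pvPerB l₁ p ++ pvPerB l₂ p := by
  simp [pvPerB, List.filter_append]

theorem pvPerB_one (c : Prop) [Decidable c] (k ph p : Int) (s : List Char) :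
    pvPerB (if c then [(k, ph, s)] else []) p = if p = k ∧ c then s else [] := by
  by_cases hc : c
  · rw [if_pos hc, pvPerB_cons, pvPerB_nil, List.append_nil]
    by_cases hp : p = k
    · simp [hp, hc]
    · have hkp : ¬ (k = p) := fun h => hp h.symm
      simp [hkp, hp]
  · rw [if_neg hc, pvPerB_nil]
    simp [hc]

-- the event list of B emits, at each boundary, exactly pvAtBoundary
theorem pvPerB_events (ws mot moa mct mca : List Char) (tp0 tp1 ap0 ap1 n p : Int) :
    pvPerB ((if 1 ≤ tp1 ∧ tp1 ≤ n then [(tp1, 0, ws ++ mct)] else []) ++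
            (if 1 ≤ ap1 ∧ ap1 ≤ n then [(ap1, 1, ws ++ mca)] else []) ++
            (if 0 ≤ tp0 ∧ tp0 < n then [(tp0, 2, mot ++ ws)] else []) ++
            (if 0 ≤ ap0 ∧ ap0 < n then [(ap0, 3, moa ++ ws)] else [])) p
      = pvAtBoundary ws mot moa mct mca tp0 tp1 ap0 ap1 n p := by
  simp only [pvPerB_append, pvPerB_one, pvAtBoundary]

-- ---- stability of the sort: filtering one boundary class commutes with sorting ----

theorem pvInsertBy_filter {α : Type} (key : α → Int) (c : Int) (x : α) (acc : List α)
    (h : acc.Pairwise (fun a b => key a ≤ key b)) :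
    (PySem.List.insertBy (fun a b => decide (key a < key b)) x acc).filter (fun y => key y == c)
      = acc.filter (fun y => key y == c) ++ (if key x == c then [x] else []) := by
  induction acc with
  | nil => simp [PySem.List.insertBy, List.filter_cons]
  | cons a t ih =>
      have hins : PySem.List.insertBy (fun a b => decide (key a < key b)) x (a :: t)
          = if decide (key x < key a) = true then x :: a :: t
            else a :: PySem.List.insertBy (fun a b => decide (key a < key b)) x t := rfl
      by_cases hlt : key x < key a
      · rw [hins, if_pos (by simpa using hlt)]
        by_cases hxc : key x = c
        · have hnil : (a :: t).filter (fun y => key y == c) = [] := by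
            rw [List.filter_eq_nil_iff]
            intro y hy
            have : key a ≤ key y := by
              rcases hy with _ | hy'
              · exact le_refl _
              · exact (List.pairwise_cons.mp h).1 y (by assumption)
            simp only [beq_iff_eq]
            omega
          simp [hnil, hxc]
        · simp [hxc]
      · rw [hins, if_neg (by simpa using hlt)]
        rw [List.filter_cons, List.filter_cons,
          ih (List.pairwise_cons.mp h).2]
        by_cases hac : key a = c <;> simp [hac]

theorem pvSorted_filter {α : Type} (key : α → Int) (c : Int) (xs : List α) :
    (PySem.List.sorted xs key).filter (fun y => key y == c) = xs.filter (fun y => key y == c) := by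
  induction xs using List.reverseRecOn with
  | nil => rfl
  | append_singleton t x ih =>
      rw [PySem.List.sorted_eq_foldl_insertBy, List.foldl_append, List.foldl_cons, List.foldl_nil,
        ← PySem.List.sorted_eq_foldl_insertBy,
        pvInsertBy_filter key c x _ (PySem.List.sorted_pairwise t key), ih,
        List.filter_append]
      by_cases hxc : key x = c <;> simp [hxc]

theorem pvPerB_sorted (l : List (Int × Int × List Char)) (p : Int) :
    pvPerB (PySem.List.sorted l (fun e => e.1)) p = pvPerB l p := by
  simp only [pvPerB]
  rw [pvSorted_filter (fun e : Int × Int × List Char => e.1) p l]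

-- ---- the splice loop ----

-- recursive form of Source B's splice loop: slices between consecutive boundaries
def pvSplice (cs : List Char) : List (Int × Int × List Char) → Int → List Char
  | [], prev => PySem.List.slice cs (some prev) none
  | e :: t, prev => PySem.List.slice cs (some prev) (some e.1) ++ e.2.2 ++ pvSplice cs t e.1

theorem pvFoldB (cs : List Char) (l : List (Int × Int × List Char)) :
    ∀ (acc : List Char) (prev : Int),
      (l.foldl (fun (a : List Char × Int) e =>
          (a.1 ++ PySem.List.slice cs (some a.2) (some e.1) ++ e.2.2, e.1)) (acc, prev)).1 ++
        PySem.List.slice cs (some ((l.foldl (fun (a : List Char × Int) e =>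
          (a.1 ++ PySem.List.slice cs (some a.2) (some e.1) ++ e.2.2, e.1)) (acc, prev)).2)) none
      = acc ++ pvSplice cs l prev := by
  induction l with
  | nil => intro acc prev; simp [pvSplice]
  | cons e t ih =>
      intro acc prev
      simp only [List.foldl_cons]
      rw [ih]
      simp [pvSplice, List.append_assoc]

-- the splice of a boundary-sorted event list is the per-boundary reassembly
theorem pvSpliceSpec (cs : List Char) (l : List (Int × Int × List Char)) :
    ∀ (k : Int), 0 ≤ k → k ≤ (cs.length : Int) →
      (∀ e ∈ l, k ≤ e.1 ∧ e.1 ≤ (cs.length : Int)) →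
      l.Pairwise (fun a b => a.1 ≤ b.1) →
      pvSplice cs l k =
        (PySem.List.enumerate (cs.drop k.toNat) k).flatMap (fun ic => pvPerB l ic.1 ++ [ic.2]) ++
          pvPerB l (cs.length : Int) := by
  induction l with
  | nil =>
      intro k hk hkn _ _
      simp only [pvSplice, pvPerB_nil, List.nil_append, List.append_nil]
      rw [PySem.List.slice_from cs hk]
      rw [List.flatMap_congr (g := fun ic => [ic.2]) (by intro x _; simp)]
      rw [← List.map_eq_flatMap, PySem.List.map_snd_enumerate]
  | cons e t ih =>
      intro k hk hkn hb hp
      have hep : k ≤ e.1 ∧ e.1 ≤ (cs.length : Int) := hb e (by simp)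
      obtain ⟨hke, hen⟩ := hep
      have he0 : 0 ≤ e.1 := le_trans hk hke
      have htb : ∀ b ∈ t, e.1 ≤ b.1 := (List.pairwise_cons.mp hp).1
      have ihp := ih e.1 he0 hen
        (fun b hbm => ⟨htb b hbm, (hb b (by simp [hbm])).2⟩)
        (List.pairwise_cons.mp hp).2
      -- split the chars from k into those before e.1 and those from e.1 on
      have hsplit : cs.drop k.toNat
          = (cs.drop k.toNat).take (e.1.toNat - k.toNat) ++ cs.drop e.1.toNat := by
        conv_lhs => rw [← List.take_append_drop (e.1.toNat - k.toNat) (cs.drop k.toNat)]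
        rw [List.drop_drop]
        congr 1
        congr 1
        omega
      have hlen1 : ((cs.drop k.toNat).take (e.1.toNat - k.toNat)).length = e.1.toNat - k.toNat := by
        rw [List.length_take, List.length_drop]
        omega
      have hkadd : k + (((cs.drop k.toNat).take (e.1.toNat - k.toNat)).length : Int) = e.1 := by
        rw [hlen1]; omega
      conv_rhs => rw [hsplit]
      rw [PySem.List.enumerate_append, hkadd, List.flatMap_append]
      -- boundaries strictly below e.1 carry no events of e :: t
      have hpart1 : (PySem.List.enumerate ((cs.drop k.toNat).take (e.1.toNat - k.toNat)) k).flatMap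
            (fun ic => pvPerB (e :: t) ic.1 ++ [ic.2])
          = (cs.drop k.toNat).take (e.1.toNat - k.toNat) := by
        rw [List.flatMap_congr (g := fun ic => [ic.2]) ?_]
        · rw [← List.map_eq_flatMap, PySem.List.map_snd_enumerate]
        · intro ic hic
          rcases (PySem.List.mem_enumerate_iff _ _ _).mp hic with ⟨j, hj, hic'⟩
          have hic1 : ic.1 < e.1 := by
            rw [hic']
            have : j < e.1.toNat - k.toNat := by rw [hlen1] at hj; exact hj
            simp only
            omega
          have hnil : pvPerB (e :: t) ic.1 = [] := by
            have hf : (e :: t).filter (fun b => b.1 == ic.1) = [] := by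
              rw [List.filter_eq_nil_iff]
              intro b hbm
              have : e.1 ≤ b.1 := by
                rcases hbm with _ | hbm'
                · exact le_refl _
                · exact htb b (by assumption)
              simp only [beq_iff_eq]
              omega
            simp [pvPerB, hf]
          rw [hnil, List.nil_append]
      rw [hpart1]
      -- boundaries from e.1 on: peel off e's own contribution
      have hpart2 : (PySem.List.enumerate (cs.drop e.1.toNat) e.1).flatMap
            (fun ic => pvPerB (e :: t) ic.1 ++ [ic.2]) ++ pvPerB (e :: t) (cs.length : Int)
          = e.2.2 ++ ((PySem.List.enumerate (cs.drop e.1.toNat) e.1).flatMap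
            (fun ic => pvPerB t ic.1 ++ [ic.2]) ++ pvPerB t (cs.length : Int)) := by
        by_cases hlt : e.1.toNat < cs.length
        · have hne1 : e.1 ≠ (cs.length : Int) := by omega
          rw [List.drop_eq_getElem_cons hlt]
          rw [PySem.List.enumerate_cons, List.flatMap_cons, List.flatMap_cons]
          have htail : (PySem.List.enumerate (cs.drop (e.1.toNat + 1)) (e.1 + 1)).flatMap
                (fun ic => pvPerB (e :: t) ic.1 ++ [ic.2])
              = (PySem.List.enumerate (cs.drop (e.1.toNat + 1)) (e.1 + 1)).flatMap
                (fun ic => pvPerB t ic.1 ++ [ic.2]) := by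
            apply List.flatMap_congr
            intro ic hic
            rcases (PySem.List.mem_enumerate_iff _ _ _).mp hic with ⟨j, hj, hic'⟩
            have : e.1 ≠ ic.1 := by rw [hic']; simp only; omega
            rw [pvPerB_cons, if_neg this, List.nil_append]
          rw [htail]
          simp only [pvPerB_cons]
          simp [hne1, List.append_assoc]
        · have hdrop : cs.drop e.1.toNat = [] := by
            rw [List.drop_eq_nil_iff]; omega
          have heq : e.1 = (cs.length : Int) := by omega
          rw [hdrop]
          simp only [PySem.List.enumerate_nil, List.flatMap_nil, List.nil_append]
          rw [pvPerB_cons, if_pos heq]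

      rw [List.append_assoc, hpart2, ← ihp]
      -- both sides are now slice ++ e.2.2 ++ pvSplice
      rw [show pvSplice cs (e :: t) k
          = PySem.List.slice cs (some k) (some e.1) ++ e.2.2 ++ pvSplice cs t e.1 from rfl]
      rw [PySem.List.slice_toNat cs hk he0]
      simp [List.append_assoc]

-- ===== VERDICT (by name: the statement is the Claim_ definition above) =====
theorem insert_marker_spec : Claim_equal_insert_marker := by
  intro text type trigger_position argument_position markers whitespace hd hp
  clear hd hp
  unfold Spec_insert_marker insert_marker insert_marker_alt
  by_cases htext : text = ""
  · subst htext
    simp only [String.toList_empty, PySem.List.enumerate_nil, List.foldl_nil]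
    rfl
  · simp only [if_neg htext]
    rw [pvFoldA]
    set cs := text.toList with hcs
    set n : Int := (cs.length : Int) with hn
    set ws : List Char := if whitespace = some true then [' '] else [] with hws
    set tp0 : Int := (PySem.List.pyGet? trigger_position 0).getD 0 with htp0
    set tp1 : Int := (PySem.List.pyGet? trigger_position 1).getD 0 with htp1
    set ap0 : Int := (PySem.List.pyGet? argument_position 0).getD 0 with hap0
    set ap1 : Int := (PySem.List.pyGet? argument_position 1).getD 0 with hap1
    set mot := pvMarkerA markers type 0 with hmot
    set moa := pvMarkerA markers "argument" 0 with hmoa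
    set mct := pvMarkerA markers type 1 with hmct
    set mca := pvMarkerA markers "argument" 1 with hmca
    have hBA : pvMarkerB = pvMarkerA := rfl
    simp only [hBA]
    set events : List (Int × Int × List Char) :=
      (if 1 ≤ tp1 ∧ tp1 ≤ n then [(tp1, 0, ws ++ mct)] else []) ++
      (if 1 ≤ ap1 ∧ ap1 ≤ n then [(ap1, 1, ws ++ mca)] else []) ++
      (if 0 ≤ tp0 ∧ tp0 < n then [(tp0, 2, mot ++ ws)] else []) ++
      (if 0 ≤ ap0 ∧ ap0 < n then [(ap0, 3, moa ++ ws)] else []) with hev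
    rw [pvFoldB]
    -- the B side is the boundary reassembly of the sorted events
    have hbounds : ∀ e ∈ PySem.List.sorted events (fun e => e.1), (0 : Int) ≤ e.1 ∧ e.1 ≤ n := by
      intro e he
      have he' : e ∈ events := (PySem.List.mem_sorted _ _ _ _).mp he
      rw [hev] at he'
      simp only [List.mem_append, List.mem_ite_nil_right, List.mem_singleton] at he'
      rcases he' with ((⟨hc, hee⟩ | ⟨hc, hee⟩) | ⟨hc, hee⟩) | ⟨hc, hee⟩ <;> subst hee <;>
        simp only <;> omega
    have hsplice := pvSpliceSpec cs (PySem.List.sorted events (fun e => e.1)) 0 le_rfl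
      (by positivity) hbounds (PySem.List.sorted_pairwise events (fun e => e.1))
    simp only [Int.toNat_zero, List.drop_zero] at hsplice
    -- replace pvPerB (sorted events) by pvAtBoundary (stability + the event-list shape)
    have hPB : ∀ p : Int, pvPerB (PySem.List.sorted events (fun e => e.1)) p
        = pvAtBoundary ws mot moa mct mca tp0 tp1 ap0 ap1 n p := by
      intro p
      rw [pvPerB_sorted, hev, pvPerB_events]
    -- the A side is the same reassembly, by the loop correspondence
    have hkey := pvKey ws mot moa mct mca tp0 tp1 ap0 ap1 n cs 0 le_rfl (by simp [hn])
    rw [pvCloseAt_zero, List.nil_append] at hkey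
    refine congrArg String.mk ?_
    rw [List.nil_append, List.nil_append, hsplice, hkey]
    simp only [hPB]
    rw [← hn]
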